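-- pv_equiv track=rewrite | github.com/MrBrantCode/unitest_baseline | mut_generate/mist_train_cf/cf_79918/solution.py | check_primality_and_parity
-- ===== SOURCE A (Python) =====
-- def check_primality_and_parity(n):
--     # check if n is even or odd
--     parity = "Even" if n % 2 == 0 else "Odd"
--     # check if n is prime or composite
--     def prime_factors(n):
--         i = 2
--         factors = []
--         while i * i <= n:
--             if n % i:
--                 i += 1
--             else:
--                 n //= i
--                 factors.append(i)
--         if n > 1:
--             factors.append(n)
--         return factors
--
--     # starting obvious check that n is not less than 2
--     if n < 2:
--         return "Number must be greater than 1", parity, []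
--     for i in range(2, int(n**0.5) + 1):
--         if n % i == 0:
--             return "Composite", parity, prime_factors(n)
--     return "Prime", parity, []
-- ===== SOURCE B (Python) =====
-- def check_primality_and_parity(n):
--     parity = "Even" if n % 2 == 0 else "Odd"
--     if n < 2:
--         return "Number must be greater than 1", parity, []
--     # single trial-division pass: collect the full prime factorization
--     factors = []
--     m = n
--     i = 2
--     while i * i <= m:
--         if m % i == 0:
--             m //= i
--             factors.append(i)
--         else:
--             i += 1
--     factors.append(m)
--     if len(factors) <= 1:
--         return "Prime", parity, []
--     return "Composite", parity, factors
-- ===== Notes on version B (the rewrite author's own statement) =====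
-- stated objective: alternative
-- what changed: A runs a primality trial-division scan and then, for composites, a second full factorization pass; B hoists the small-input guard and runs a single factorization loop, inferring primality from whether the collected factor list is a singleton.
import Mathlib
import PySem

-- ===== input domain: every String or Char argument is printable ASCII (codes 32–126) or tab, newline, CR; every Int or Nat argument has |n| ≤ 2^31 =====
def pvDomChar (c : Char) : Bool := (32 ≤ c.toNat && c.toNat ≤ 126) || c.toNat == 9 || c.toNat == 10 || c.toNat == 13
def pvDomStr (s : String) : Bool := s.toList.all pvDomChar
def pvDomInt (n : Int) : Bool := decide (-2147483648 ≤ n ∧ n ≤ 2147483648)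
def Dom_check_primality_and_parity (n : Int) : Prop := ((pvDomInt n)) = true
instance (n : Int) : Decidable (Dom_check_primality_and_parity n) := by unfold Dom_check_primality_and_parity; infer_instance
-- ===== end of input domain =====

-- B replaces A's two scans (primality check, then a separate factorization for composites) by one
-- factorization pass from which primality is read off the factor count; same results, same cost class.

-- ===== PORT A =====
-- the inner `prime_factors` while-loop; fuel-driven (fuel (2*n).toNat is always sufficient at the call site)
def pvPfA (fuel : Nat) (i n : Int) (acc : List Int) : List Int :=
  match fuel with
  | 0 => acc
  | f + 1 =>
    if i * i ≤ n then
      if PySem.Int.mod n i ≠ 0 then pvPfA f (i + 1) n acc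
      else pvPfA f i (PySem.Int.floordiv n i) (acc ++ [i])
    else if n > 1 then acc ++ [n] else acc

def pvPrimeFactors (n : Int) : List Int := pvPfA (2 * n).toNat 2 n []

-- the `for i in range(...)` loop with its early `return`: first divisor hit decides the branch
def pvFindA (n : Int) : List Int → Bool
  | [] => false
  | i :: rest => if PySem.Int.mod n i = 0 then true else pvFindA n rest

-- int(n**0.5) ported as the exact integer sqrt: for 0 ≤ n ≤ 2^31 the double computation n**0.5
-- is exact enough that int(n**0.5) = isqrt(n).
def check_primality_and_parity (n : Int) : String × String × List Int :=
  let parity := if PySem.Int.mod n 2 = 0 then "Even" else "Odd"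
  if n < 2 then ("Number must be greater than 1", parity, [])
  else if pvFindA n (PySem.List.pyRange 2 (((Nat.sqrt n.toNat : Nat) : Int) + 1) 1) then
    ("Composite", parity, pvPrimeFactors n)
  else ("Prime", parity, [])

-- ===== PORT B =====
-- B's single factorization loop (appends m unconditionally at exit); fuel as in A's helper
def pvPfB (fuel : Nat) (i m : Int) (acc : List Int) : List Int :=
  match fuel with
  | 0 => acc
  | f + 1 =>
    if i * i ≤ m then
      if PySem.Int.mod m i = 0 then pvPfB f i (PySem.Int.floordiv m i) (acc ++ [i])
      else pvPfB f (i + 1) m acc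
    else acc ++ [m]

def check_primality_and_parity_alt (n : Int) : String × String × List Int :=
  let parity := if PySem.Int.mod n 2 = 0 then "Even" else "Odd"
  if n < 2 then ("Number must be greater than 1", parity, [])
  else
    let factors := pvPfB (2 * n).toNat 2 n []
    if factors.length ≤ 1 then ("Prime", parity, [])
    else ("Composite", parity, factors)

-- ===== PRECONDITION & SPEC =====
def Spec_check_primality_and_parity (n : Int) (out : String × String × List Int) : Prop := out = check_primality_and_parity_alt n
instance (n : Int) (out : String × String × List Int) : Decidable (Spec_check_primality_and_parity n out) := by unfold Spec_check_primality_and_parity; infer_instance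

-- ===== CLAIM (what is proved, stated in full; the proofs are below) =====
def Claim_equal_check_primality_and_parity : Prop := ∀ (n : Int), Dom_check_primality_and_parity n → Spec_check_primality_and_parity n (check_primality_and_parity n)

-- ===== LEMMAS AND PROOFS =====

-- arithmetic facts about one division step of the loops
lemma pvDivFacts (i n : Int) (h2i : 2 ≤ i) (hsq : i * i ≤ n)
    (hm : PySem.Int.mod n i = 0) :
    2 ≤ PySem.Int.floordiv n i ∧ 2 * PySem.Int.floordiv n i ≤ n := by
  have hip : (0 : Int) < i := by omega
  rw [PySem.Int.floordiv_eq_ediv_of_pos hip]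
  obtain ⟨q, hq⟩ := (PySem.Int.mod_eq_zero_iff_dvd n i).mp hm
  have hqe : n / i = q := by rw [hq]; exact Int.mul_ediv_cancel_left q (by omega)
  rw [hqe]
  have hiq : i ≤ q := by nlinarith
  exact ⟨by omega, by nlinarith⟩

lemma pvLtOfSq (i n : Int) (h2i : 2 ≤ i) (hsq : i * i ≤ n) : i < n := by nlinarith

-- the two while-loops compute the same list (they differ only in branch order and the final n>1 test)
lemma pvPfAB : ∀ (f : Nat) (i n : Int) (acc : List Int), 2 ≤ i → 2 ≤ n →
    pvPfA f i n acc = pvPfB f i n acc := by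
  intro f
  induction f with
  | zero => intro i n acc _ _; rfl
  | succ f ih =>
    intro i n acc h2i h2n
    simp only [pvPfA, pvPfB]
    by_cases hii : i * i ≤ n
    · rw [if_pos hii, if_pos hii]
      by_cases hm : PySem.Int.mod n i = 0
      · rw [if_pos hm, if_neg (by simp [hm])]
        exact ih i (PySem.Int.floordiv n i) (acc ++ [i]) h2i (pvDivFacts i n h2i hii hm).1
      · rw [if_neg hm, if_pos hm]
        exact ih (i + 1) n acc (by omega) h2n
    · rw [if_neg hii, if_neg hii, if_pos (by omega : n > 1)]

-- the loop never shortens the accumulator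
lemma pvPfBMono : ∀ (f : Nat) (i m : Int) (acc : List Int),
    acc.length ≤ (pvPfB f i m acc).length := by
  intro f
  induction f with
  | zero => intro i m acc; simp [pvPfB]
  | succ f ih =>
    intro i m acc
    simp only [pvPfB]
    by_cases hii : i * i ≤ m
    · rw [if_pos hii]
      by_cases hm : PySem.Int.mod m i = 0
      · rw [if_pos hm]
        calc acc.length ≤ (acc ++ [i]).length := by simp
          _ ≤ _ := ih i (PySem.Int.floordiv m i) (acc ++ [i])
      · rw [if_neg hm]; exact ih (i + 1) m acc
    · rw [if_neg hii]; simp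

-- with sufficient fuel the loop appends at least one element
lemma pvPfBLen : ∀ (f : Nat) (i m : Int) (acc : List Int), 2 ≤ i → 2 ≤ m →
    (2 * m - i).toNat < f → acc.length + 1 ≤ (pvPfB f i m acc).length := by
  intro f
  induction f with
  | zero => intro i m acc _ _ hf; omega
  | succ f ih =>
    intro i m acc h2i h2m hf
    simp only [pvPfB]
    by_cases hii : i * i ≤ m
    · rw [if_pos hii]
      by_cases hm : PySem.Int.mod m i = 0
      · rw [if_pos hm]
        calc acc.length + 1 = (acc ++ [i]).length := by simp
          _ ≤ _ := pvPfBMono f i (PySem.Int.floordiv m i) (acc ++ [i])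
      · rw [if_neg hm]
        have := pvLtOfSq i m h2i hii
        exact ih (i + 1) m acc (by omega) h2m (by omega)
    · rw [if_neg hii]; simp

-- no divisor from i on: the loop just climbs i and returns acc ++ [m]
lemma pvPfBPrime : ∀ (f : Nat) (i m : Int) (acc : List Int), 2 ≤ i → 2 ≤ m →
    (2 * m - i).toNat < f →
    (∀ j : Int, i ≤ j → j * j ≤ m → PySem.Int.mod m j ≠ 0) →
    pvPfB f i m acc = acc ++ [m] := by
  intro f
  induction f with
  | zero => intro i m acc _ _ hf _; omega
  | succ f ih =>
    intro i m acc h2i h2m hf hnod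
    simp only [pvPfB]
    by_cases hii : i * i ≤ m
    · rw [if_pos hii, if_neg (hnod i le_rfl hii)]
      have := pvLtOfSq i m h2i hii
      exact ih (i + 1) m acc (by omega) h2m (by omega)
        (fun j hj hjj => hnod j (by omega) hjj)
    · rw [if_neg hii]

-- some divisor from i on: the loop records at least two factors
lemma pvPfBComp : ∀ (f : Nat) (i m : Int) (acc : List Int), 2 ≤ i → 2 ≤ m →
    (2 * m - i).toNat < f →
    (∃ j : Int, i ≤ j ∧ j * j ≤ m ∧ PySem.Int.mod m j = 0) →
    acc.length + 2 ≤ (pvPfB f i m acc).length := by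
  intro f
  induction f with
  | zero =>
    intro i m acc h2i h2m hf hj
    obtain ⟨j, hij, hjj, _⟩ := hj
    have := pvLtOfSq j m (by omega) hjj
    omega
  | succ f ih =>
    intro i m acc h2i h2m hf hj
    obtain ⟨j, hij, hjj, hjm⟩ := hj
    have hii : i * i ≤ m := le_trans (by nlinarith) hjj
    have hin : i < m := pvLtOfSq i m h2i hii
    simp only [pvPfB, if_pos hii]
    by_cases hm : PySem.Int.mod m i = 0
    · rw [if_pos hm]
      obtain ⟨hq2, hq⟩ := pvDivFacts i m h2i hii hm
      have := pvPfBLen f i (PySem.Int.floordiv m i) (acc ++ [i]) h2i hq2 (by omega)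
      simpa using this
    · rw [if_neg hm]
      have hne : j ≠ i := fun h => hm (h ▸ hjm)
      exact ih (i + 1) m acc (by omega) h2m (by omega) ⟨j, by omega, hjj, hjm⟩

-- A's for-loop hits iff some element of the range divides n
lemma pvFindAIff (n : Int) : ∀ (xs : List Int),
    pvFindA n xs = true ↔ ∃ j ∈ xs, PySem.Int.mod n j = 0 := by
  intro xs
  induction xs with
  | nil => simp [pvFindA]
  | cons x rest ih =>
    simp only [pvFindA]
    by_cases hx : PySem.Int.mod n x = 0
    · simp [hx]
    · simp [hx, ih]

-- membership in range(2, isqrt(n)+1) is exactly "2 ≤ j and j*j ≤ n"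
lemma pvRangeSq (n j : Int) (hn : 2 ≤ n) :
    j ∈ PySem.List.pyRange 2 (((Nat.sqrt n.toNat : Nat) : Int) + 1) 1 ↔
      2 ≤ j ∧ j * j ≤ n := by
  rw [PySem.List.mem_pyRange_one]
  constructor
  · rintro ⟨h2j, hlt⟩
    refine ⟨h2j, ?_⟩
    have hj : (j.toNat : Int) = j := by omega
    have hnn : (n.toNat : Int) = n := by omega
    have hle : j.toNat ≤ Nat.sqrt n.toNat := by omega
    have h1 : ((j.toNat * j.toNat : Nat) : Int) ≤ (n.toNat : Int) :=
      Int.ofNat_le.mpr (Nat.le_sqrt.mp hle)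
    push_cast at h1
    rw [hj, hnn] at h1
    exact h1
  · rintro ⟨h2j, hjj⟩
    refine ⟨h2j, ?_⟩
    have hj : (j.toNat : Int) = j := by omega
    have hnn : (n.toNat : Int) = n := by omega
    have h1 : ((j.toNat * j.toNat : Nat) : Int) ≤ (n.toNat : Int) := by
      push_cast
      rw [hj, hnn]
      exact hjj
    have hle : j.toNat ≤ Nat.sqrt n.toNat := Nat.le_sqrt.mpr (by exact_mod_cast h1)
    omega

-- ===== VERDICT (by name: the statement is the Claim_ definition above) =====
theorem check_primality_and_parity_spec : Claim_equal_check_primality_and_parity := by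
  intro n _
  unfold Spec_check_primality_and_parity
  unfold check_primality_and_parity check_primality_and_parity_alt
  by_cases hlt : n < 2
  · simp [hlt]
  · have h2n : 2 ≤ n := by omega
    have hfuel : (2 * n - 2).toNat < (2 * n).toNat := by omega
    simp only [if_neg hlt]
    by_cases hfind : pvFindA n (PySem.List.pyRange 2 (((Nat.sqrt n.toNat : Nat) : Int) + 1) 1) = true
    · -- composite: both return the same factor list
      obtain ⟨j, hjmem, hjdiv⟩ := (pvFindAIff n _).mp hfind
      obtain ⟨h2j, hjj⟩ := (pvRangeSq n j h2n).mp hjmem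
      have hlen := pvPfBComp (2 * n).toNat 2 n [] (by omega) h2n hfuel ⟨j, h2j, hjj, hjdiv⟩
      simp only [List.length_nil] at hlen
      have hgt : ¬ ((pvPfB (2 * n).toNat 2 n []).length ≤ 1) := by omega
      rw [if_pos hfind, if_neg hgt]
      unfold pvPrimeFactors
      rw [pvPfAB (2 * n).toNat 2 n [] (by omega) h2n]
    · -- prime: the single pass yields exactly one factor
      have hnod : ∀ j : Int, (2:Int) ≤ j → j * j ≤ n → PySem.Int.mod n j ≠ 0 := by
        intro j h2j hjj hdiv
        exact hfind ((pvFindAIff n _).mpr ⟨j, (pvRangeSq n j h2n).mpr ⟨h2j, hjj⟩, hdiv⟩)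
      have := pvPfBPrime (2 * n).toNat 2 n [] (by omega) h2n hfuel hnod
      rw [if_neg hfind, this]
      simp
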